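-- pv_equiv track=rewrite | github.com/BP92452P/r | f/The.py | find_best_diagnosis
-- ===== SOURCE A (Python) =====
-- def score_diagnosis(user_symptoms, diagnosis_keywords):
--     """
--     Score overlap between user symptoms (set) and diagnosis keywords (set).
--     Returns integer overlap count.
--     """
--     count = 0
--     for s in user_symptoms:
--         if s in diagnosis_keywords:
--             count += 1
--     return count
--
-- def find_best_diagnosis(user_symptoms, symptom_map):
--     """
--     Return (best_diagnosis, score). If none, returns (None, 0).
--     """
--     best = None
--     best_score = 0
--     # Deterministic order by diagnosis name for tie-breaking
--     diagnoses = list(symptom_map.keys())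
--     diagnoses.sort()
--     for d in diagnoses:
--         score = score_diagnosis(user_symptoms, symptom_map[d])
--         if score > best_score:
--             best = d
--             best_score = score
--     return (best, best_score)
-- ===== SOURCE B (Python) =====
-- def find_best_diagnosis(user_symptoms, symptom_map):
--     index = {}
--     for d, kws in symptom_map.items():
--         for k in set(kws):
--             index[k] = index.get(k, []) + [d]
--     counts = {}
--     for s in user_symptoms:
--         for d in index.get(s, []):
--             counts[d] = counts.get(d, 0) + 1
--     best, best_score = None, 0
--     for d, c in counts.items():
--         if c > best_score or (c == best_score and best is not None and d < best):
--             best, best_score = d, c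
--     return (best, best_score)
-- ===== Notes on version B (the rewrite author's own statement) =====
-- stated objective: faster
-- what changed: Replaces sort-all-keys-then-score-each-diagnosis with an inverted index keyword->diagnoses built once, a single pass over user_symptoms accumulating per-diagnosis hit counts, and a max/tie-break scan over the nonzero counts only.
import Mathlib
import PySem

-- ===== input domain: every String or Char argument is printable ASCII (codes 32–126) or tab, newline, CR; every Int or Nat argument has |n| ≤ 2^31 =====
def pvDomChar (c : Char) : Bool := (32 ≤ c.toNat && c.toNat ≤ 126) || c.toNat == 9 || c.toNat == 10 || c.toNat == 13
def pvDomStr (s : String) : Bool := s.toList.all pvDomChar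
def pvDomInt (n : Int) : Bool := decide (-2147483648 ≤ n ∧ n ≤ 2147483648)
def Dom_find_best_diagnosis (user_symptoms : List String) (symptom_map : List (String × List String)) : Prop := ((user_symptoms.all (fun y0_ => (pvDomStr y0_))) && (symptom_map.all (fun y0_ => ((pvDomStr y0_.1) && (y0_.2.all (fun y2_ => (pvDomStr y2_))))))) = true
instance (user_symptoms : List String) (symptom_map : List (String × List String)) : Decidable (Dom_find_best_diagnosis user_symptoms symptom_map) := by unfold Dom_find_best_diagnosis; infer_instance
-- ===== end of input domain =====

-- B replaces A's sort-then-score-every-diagnosis scan by an inverted index keyword→diagnoses,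
-- one pass over user_symptoms accumulating hit counts, and a max/tie-break scan over the
-- nonzero counts only (objective: faster on many-diagnosis/few-hit inputs).

-- ===== PORT A =====
def score_diagnosis (user_symptoms : List String) (diagnosis_keywords : List String) : Int :=
  user_symptoms.foldl (fun count s => if diagnosis_keywords.contains s then count + 1 else count) 0

def find_best_diagnosis (user_symptoms : List String) (symptom_map : List (String × List String)) : Option String × Int :=
  let sm := PySem.Dict.ofList symptom_map
  -- diagnoses = list(symptom_map.keys()); diagnoses.sort()
  let diagnoses := PySem.List.sorted sm.keys (fun x => x)
  -- symptom_map[d] with d drawn from symptom_map.keys() never raises; getD [] is exact here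
  diagnoses.foldl
    (fun st d =>
      let score := score_diagnosis user_symptoms (sm.getD d [])
      if st.2 < score then (some d, score) else st)
    (none, 0)

-- ===== PORT B =====
-- best is not None and d < best
def pvBetter (st : Option String × Int) (d : String) (c : Int) : Bool :=
  decide (st.2 < c) || (decide (c = st.2) && (match st.1 with | some b => decide (d < b) | none => false))

def find_best_diagnosis_alt (user_symptoms : List String) (symptom_map : List (String × List String)) : Option String × Int :=
  let sm := PySem.Dict.ofList symptom_map
  -- for d, kws in symptom_map.items(): for k in set(kws): index[k] = index.get(k, []) + [d]
  -- (CPython's set(kws) iteration order only permutes the insertion order of index's KEYS,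
  --  never the content of any index[k] list, so every index.get(s, []) below — and hence the
  --  returned value — is independent of it; the port iterates set(kws) in first-occurrence order)
  let index : PySem.Dict String (List String) :=
    sm.items.foldl
      (fun ix p => (PySem.Set.ofList p.2).foldl (fun ix k => ix.insert k (ix.getD k [] ++ [p.1])) ix)
      PySem.Dict.empty
  -- for s in user_symptoms: for d in index.get(s, []): counts[d] = counts.get(d, 0) + 1
  let counts : PySem.Dict String Int :=
    user_symptoms.foldl
      (fun c s => (index.getD s []).foldl (fun c d => c.insert d (c.getD d 0 + 1)) c)
      PySem.Dict.empty
  counts.items.foldl (fun st p => if pvBetter st p.1 p.2 then (some p.1, p.2) else st) (none, 0)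

-- ===== PRECONDITION & SPEC =====
def Spec_find_best_diagnosis (user_symptoms : List String) (symptom_map : List (String × List String)) (out : Option String × Int) : Prop := out = find_best_diagnosis_alt user_symptoms symptom_map
instance (user_symptoms : List String) (symptom_map : List (String × List String)) (out : Option String × Int) : Decidable (Spec_find_best_diagnosis user_symptoms symptom_map out) := by unfold Spec_find_best_diagnosis; infer_instance

-- ===== CLAIM =====
def Claim_equal_find_best_diagnosis : Prop := ∀ (user_symptoms : List String) (symptom_map : List (String × List String)), Dom_find_best_diagnosis user_symptoms symptom_map → Spec_find_best_diagnosis user_symptoms symptom_map (find_best_diagnosis user_symptoms symptom_map)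

-- ===== LEMMAS AND PROOFS =====

-- selection step shared shape (B's final loop body)
def pvStep (st : Option String × Int) (p : String × Int) : Option String × Int :=
  if pvBetter st p.1 p.2 then (some p.1, p.2) else st

-- the flattened (keyword, diagnosis) pair list behind B's inverted index
def pvP (D : PySem.Dict String (List String)) : List (String × String) :=
  D.items.flatMap (fun p => (PySem.Set.ofList p.2).map (fun k => (k, p.1)))

-- B's flattened hit list: one occurrence of d per (s, matching diagnosis d)
def pvL (us : List String) (D : PySem.Dict String (List String)) : List String :=
  us.flatMap (fun s => ((pvP D).filter (fun q => q.1 == s)).map (fun q => q.2))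

-- A's score of diagnosis d, as a countP
def pvSc (us : List String) (D : PySem.Dict String (List String)) (d : String) : Int :=
  (us.countP (fun s => (D.getD d []).contains s) : Int)

lemma score_eq (us kws : List String) :
    score_diagnosis us kws = (us.countP (fun s => kws.contains s) : Int) := by
  unfold score_diagnosis
  simpa using PySem.List.foldl_count_if (fun s => kws.contains s) us 0

-- B's index lookup is exactly the filtered pair list
lemma index_getD (D : PySem.Dict String (List String)) (s : String) :
    (D.items.foldl
      (fun ix p => (PySem.Set.ofList p.2).foldl (fun ix k => ix.insert k (ix.getD k [] ++ [p.1])) ix)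
      PySem.Dict.empty).getD s []
    = ((pvP D).filter (fun q => q.1 == s)).map (fun q => q.2) := by
  have h : (D.items.foldl
      (fun ix p => (PySem.Set.ofList p.2).foldl (fun ix k => ix.insert k (ix.getD k [] ++ [p.1])) ix)
      PySem.Dict.empty)
      = (pvP D).foldl (fun d q => d.modify q.1 [] (fun v => v ++ [q.2])) PySem.Dict.empty := by
    rw [pvP, List.foldl_flatMap]
    simp only [List.foldl_map, PySem.Dict.modify]
  rw [h, PySem.Dict.getD_foldl_modify_append, PySem.Dict.getD_empty]
  simp

lemma sum_ite_countP {α : Type} (l : List α) (p : α → Bool) :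
    (l.map (fun a => if p a then 1 else 0)).sum = l.countP p := by
  induction l with
  | nil => rfl
  | cons x t ih => by_cases h : p x <;> simp [h, ih, Nat.add_comm]

-- per-symbol hit count: d is hit once by s iff d is a key and s one of its keywords
lemma sum_map_ite_key {α : Type} [DecidableEq α] (K : List α) (hK : K.Nodup) (d : α) (c : Nat) :
    (K.map (fun k => if k = d then c else 0)).sum = if d ∈ K then c else 0 := by
  induction K with
  | nil => simp
  | cons k t ih =>
    rcases List.nodup_cons.mp hK with ⟨hk, ht⟩
    by_cases hkd : k = d
    · subst hkd; simp [ih ht, hk]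
    · simp [hkd, ih ht, Ne.symm hkd]

lemma count_matches (D : PySem.Dict String (List String)) (hD : D.keys.Nodup) (s d : String) :
    (((pvP D).filter (fun q => q.1 == s)).map (fun q => q.2)).count d
    = if d ∈ D.keys ∧ s ∈ D.getD d [] then 1 else 0 := by
  have hform : (((pvP D).filter (fun q => q.1 == s)).map (fun q => q.2)).count d
      = List.countP (fun q => q.2 == d && q.1 == s) (pvP D) := by
    rw [List.count_eq_countP, List.countP_map, List.countP_filter]
    rfl
  rw [hform, pvP, List.countP_flatMap, PySem.Dict.items_eq_map_keys D hD [], List.map_map]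
  have hfun : ∀ k ∈ D.keys,
      ((List.countP (fun q => q.2 == d && q.1 == s) ∘ fun p => (PySem.Set.ofList p.2).map fun k => (k, p.1)) ∘
        fun k => (k, D.getD k [])) k
      = if k = d then (if s ∈ D.getD d [] then 1 else 0) else 0 := by
    intro k hk
    simp only [Function.comp_apply, List.countP_map]
    by_cases hkd : k = d
    · subst hkd
      have hcong : ((fun (q : String × String) => q.2 == k && q.1 == s) ∘ fun x => (x, k)) = (fun x => x == s) := by
        funext x; simp
      rw [if_pos rfl, hcong, ← List.count_eq_countP]
      by_cases hs : s ∈ D.getD k []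
      · rw [List.count_eq_one_of_mem (PySem.Set.nodup_ofList _) ((PySem.Set.mem_ofList _ _).mpr hs), if_pos hs]
      · rw [List.count_eq_zero.mpr (fun hmem => hs ((PySem.Set.mem_ofList _ _).mp hmem)), if_neg hs]
    · have hcong : ((fun (q : String × String) => q.2 == d && q.1 == s) ∘ fun x => (x, k)) = (fun _ => false) := by
        funext x; simp [hkd]
      rw [if_neg hkd, hcong]
      simp
  rw [List.map_congr_left hfun, sum_map_ite_key D.keys hD d _]
  by_cases hm : d ∈ D.keys <;> by_cases hs : s ∈ D.getD d [] <;> simp [hm, hs]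

-- the hit-list count of d is A's score (for keys) and 0 otherwise
lemma count_pvL (us : List String) (D : PySem.Dict String (List String)) (hD : D.keys.Nodup)
    (d : String) :
    (pvL us D).count d
    = if d ∈ D.keys then us.countP (fun s => (D.getD d []).contains s) else 0 := by
  rw [pvL, List.count_flatMap]
  by_cases hd : d ∈ D.keys
  · simp only [hd, if_true]
    rw [← sum_ite_countP us (fun s => (D.getD d []).contains s)]
    congr 1
    apply List.map_congr_left
    intro s _
    rw [Function.comp_apply, count_matches D hD s d]
    by_cases hs : s ∈ D.getD d [] <;> simp [hs, hd]
  · simp only [hd, if_false]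
    have : ∀ s ∈ us, ((((pvP D).filter (fun q => q.1 == s)).map (fun q => q.2)).count d) = 0 := by
      intro s _
      rw [count_matches D hD s d]
      simp [hd]
    rw [List.map_congr_left (fun s hs => by rw [Function.comp_apply, this s hs])]
    simp

lemma mem_pvL (us : List String) (D : PySem.Dict String (List String)) (hD : D.keys.Nodup)
    (d : String) :
    d ∈ pvL us D ↔ d ∈ D.keys ∧ 0 < us.countP (fun s => (D.getD d []).contains s) := by
  rw [← List.count_pos_iff, count_pvL us D hD]
  by_cases hd : d ∈ D.keys <;> simp [hd]

lemma better_iff (st : Option String × Int) (d : String) (c : Int) :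
    pvBetter st d c = true ↔ st.2 < c ∨ (c = st.2 ∧ ∃ b, st.1 = some b ∧ d < b) := by
  obtain ⟨b?, zs⟩ := st
  rcases b? with _ | b <;> simp [pvBetter]

-- B's selection step as a propositional conditional
lemma step_eq (st : Option String × Int) (p : String × Int) :
    pvStep st p
    = if st.2 < p.2 ∨ (p.2 = st.2 ∧ ∃ b, st.1 = some b ∧ p.1 < b) then (some p.1, p.2) else st := by
  simp only [pvStep]
  by_cases h : pvBetter st p.1 p.2 = true
  · rw [if_pos h, if_pos ((better_iff st p.1 p.2).mp h)]
  · rw [if_neg h, if_neg (fun hc => h ((better_iff st p.1 p.2).mpr hc))]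

-- B's selection step commutes on pairs with distinct names
lemma step_comm (p q : String × Int) (hpq : p.1 ≠ q.1) (z : Option String × Int) :
    pvStep (pvStep z p) q = pvStep (pvStep z q) p := by
  obtain ⟨pd, pc⟩ := p
  obtain ⟨qd, qc⟩ := q
  obtain ⟨zb, zs⟩ := z
  simp only [step_eq]
  split_ifs with h1 h2 h3 h4 h5 h6 h7 h8 <;>
    simp_all only [Option.some.injEq, not_or, not_and, not_exists, not_lt, exists_eq_left'] <;>
    try rfl
  all_goals exfalso
  · rcases h2 with h2 | ⟨h2e, h2s⟩ <;> rcases h4 with h4 | ⟨h4e, h4s⟩ <;>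
      first | omega | exact absurd (h2s.trans h4s) (lt_irrefl _)
  · rcases h1 with h1 | ⟨h1e, b, hb, h1s⟩ <;> rcases h2 with h2 | ⟨h2e, h2s⟩ <;> try omega
    have hbq : b ≤ qd := h3.2 (by omega) b hb
    exact absurd ((h2s.trans h1s).trans_le hbq) (lt_irrefl _)
  · exact hpq (le_antisymm (h2.2 (by omega)) (h6.2 (by omega)))
  · rcases h7 with h7 | ⟨h7e, b, hb, h7s⟩ <;> rcases h8 with h8 | ⟨h8e, h8s⟩ <;> try omega
    have hbp : b ≤ pd := h1.2 (by omega) b hb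
    exact absurd ((h8s.trans h7s).trans_le hbp) (lt_irrefl _)

-- entries with nonpositive count are no-ops of the selection fold
lemma fold_drop_nonpos (l : List (String × Int)) (st : Option String × Int)
    (hst : st = (none, 0) ∨ ∃ b, st.1 = some b ∧ 0 < st.2) :
    l.foldl pvStep st = (l.filter (fun p => decide (0 < p.2))).foldl pvStep st := by
  induction l generalizing st with
  | nil => rfl
  | cons p t ih =>
    by_cases hp : 0 < p.2
    · rw [List.foldl_cons, List.filter_cons_of_pos (by simpa using hp), List.foldl_cons]
      apply ih
      rw [step_eq]
      split_ifs with h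
      · exact Or.inr ⟨p.1, rfl, hp⟩
      · exact hst
    · have hnoop : pvStep st p = st := by
        rw [step_eq, if_neg]
        rcases hst with rfl | ⟨b, hb, hpos⟩
        · simp only [not_or, not_and, not_exists]
          exact ⟨by simpa using hp, fun h b hb => by simp at hb⟩
        · simp only [not_or, not_and, not_exists]
          constructor
          · omega
          · intro he; omega
      rw [List.foldl_cons, List.filter_cons_of_neg (by simpa using hp), hnoop]
      exact ih st hst

-- on a strictly increasing name list, A's strict-max fold IS B's selection fold
lemma foldA_eq (l : List String) (f : String → Int) (st : Option String × Int)
    (hl : l.Pairwise (fun a b => a < b)) (hst : ∀ b, st.1 = some b → ∀ d ∈ l, b < d) :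
    l.foldl (fun st d => if st.2 < f d then (some d, f d) else st) st
    = l.foldl (fun st d => pvStep st (d, f d)) st := by
  induction l generalizing st with
  | nil => rfl
  | cons d t ih =>
    rcases List.pairwise_cons.mp hl with ⟨hd, ht⟩
    have hstep : pvStep st (d, f d) = if st.2 < f d then (some d, f d) else st := by
      rw [step_eq]
      congr 1
      simp only [eq_iff_iff]
      constructor
      · rintro (h | ⟨he, b, hb, hdb⟩)
        · exact h
        · exact absurd hdb (not_lt.mpr (le_of_lt (hst b hb d (List.mem_cons_self))))
      · exact Or.inl
    rw [List.foldl_cons, List.foldl_cons, hstep]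
    refine ih _ ht ?_
    intro b hb e he
    split_ifs at hb with h
    · cases hb; exact hd e he
    · exact hst b hb e (List.mem_cons_of_mem d he)

-- A unfolded: the strict-max fold over the sorted keys, scores written as countP
lemma A_eq (us : List String) (sm : List (String × List String)) :
    find_best_diagnosis us sm
    = (PySem.List.sorted (PySem.Dict.ofList sm).keys (fun x => x)).foldl
        (fun st d => if st.2 < pvSc us (PySem.Dict.ofList sm) d
                     then (some d, pvSc us (PySem.Dict.ofList sm) d) else st) (none, 0) := by
  unfold find_best_diagnosis
  simp only [score_eq]
  rfl

-- B unfolded: the selection fold over Counter(pvL)'s items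
lemma B_eq (us : List String) (sm : List (String × List String)) :
    find_best_diagnosis_alt us sm
    = ((PySem.Set.ofList (pvL us (PySem.Dict.ofList sm))).map
        (fun k => (k, ((pvL us (PySem.Dict.ofList sm)).count k : Int)))).foldl pvStep (none, 0) := by
  unfold find_best_diagnosis_alt
  simp only [index_getD]
  rw [← List.foldl_flatMap, PySem.Dict.foldl_insert_getD_add_one_eq_counter,
    PySem.Dict.items_counter]
  rfl

lemma main_eq (us : List String) (sm : List (String × List String)) :
    find_best_diagnosis us sm = find_best_diagnosis_alt us sm := by
  rw [A_eq, B_eq]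
  set D := PySem.Dict.ofList sm with hDdef
  set L := pvL us D with hLdef
  have hD : D.keys.Nodup := PySem.Dict.nodup_keys_ofList sm
  have hsort_perm := PySem.List.sorted_perm D.keys (fun x => x) false
  have hsnodup : (PySem.List.sorted D.keys (fun x => x)).Nodup := hsort_perm.nodup_iff.mpr hD
  have hpair : (PySem.List.sorted D.keys (fun x => x)).Pairwise (fun a b => a < b) :=
    ((PySem.List.sorted_pairwise D.keys (fun x => x)).and hsnodup).imp
      (fun h => lt_of_le_of_ne h.1 h.2)
  rw [foldA_eq _ (pvSc us D) _ hpair (fun b hb => absurd hb (by simp))]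
  rw [show (PySem.List.sorted D.keys (fun x => x)).foldl
        (fun st d => pvStep st (d, pvSc us D d)) (none, 0)
      = ((PySem.List.sorted D.keys (fun x => x)).map (fun d => (d, pvSc us D d))).foldl
          pvStep (none, 0) from (List.foldl_map).symm]
  rw [fold_drop_nonpos _ _ (Or.inl rfl), List.filter_map]
  have hmapc : (PySem.Set.ofList L).map (fun k => (k, (L.count k : Int)))
      = (PySem.Set.ofList L).map (fun d => (d, pvSc us D d)) := by
    apply List.map_congr_left
    intro d hd
    have hdL : d ∈ L := (PySem.Set.mem_ofList _ _).mp hd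
    have hdK : d ∈ D.keys := ((mem_pvL us D hD d).mp hdL).1
    rw [count_pvL us D hD d, if_pos hdK]
    rfl
  rw [hmapc]
  have hbase : ((PySem.List.sorted D.keys (fun x => x)).filter
        ((fun (p : String × Int) => decide (0 < p.2)) ∘ (fun d => (d, pvSc us D d)))).Perm
      (PySem.Set.ofList L) := by
    rw [List.perm_ext_iff_of_nodup (hsnodup.filter _) (PySem.Set.nodup_ofList _)]
    intro d
    rw [List.mem_filter, PySem.Set.mem_ofList, mem_pvL us D hD d, PySem.List.mem_sorted]
    simp only [Function.comp_apply, decide_eq_true_eq, pvSc, Int.natCast_pos]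
  refine List.Perm.foldl_eq' (hbase.map _) ?_ (none, 0)
  intro x hx y hy z
  rcases List.mem_map.mp hx with ⟨a, _, rfl⟩
  rcases List.mem_map.mp hy with ⟨b, _, rfl⟩
  by_cases hab : a = b
  · subst hab; rfl
  · exact step_comm _ _ hab z

-- ===== VERDICT =====
theorem find_best_diagnosis_spec : Claim_equal_find_best_diagnosis := by
  intro us sm _
  unfold Spec_find_best_diagnosis
  exact main_eq us sm
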